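-- pv_equiv track=rewrite | github.com/ochpochmak14/yandex.lyceum | Функции. Возвращение значений из функций/Поиски_возвышенного.py | find_mountain
-- ===== SOURCE A (Python) =====
-- def find_mountain(items: list) -> tuple:
--     mx = 0
--     for i in range(len(items)):
--         for j in range(len(items[i])):
--             mx = max(mx, items[i][j])
--     for i in range(len(items)):
--         for j in range(len(items[i])):
--             if items[i][j] == mx:
--                 return i, j
-- ===== SOURCE B (Python) =====
-- def find_mountain(items: list) -> tuple:
--     best = None
--     pos = None
--     for i, row in enumerate(items):
--         for j, v in enumerate(row):
--             if v >= 0 and (best is None or v > best):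
--                 best = v
--                 pos = (i, j)
--     return pos
-- ===== Notes on version B (the rewrite author's own statement) =====
-- stated objective: faster
-- what changed: B replaces A's two full traversals (compute the 0-floored max, then rescan every cell for its first position) by a single pass maintaining a running (best, pos) pair, updating on the first nonnegative cell and on each strict improvement.
-- outside the precondition, e.g. on find_mountain([[-1]]): A returns None, B returns None; on find_mountain([]): A returns None, B returns None
import Mathlib
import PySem

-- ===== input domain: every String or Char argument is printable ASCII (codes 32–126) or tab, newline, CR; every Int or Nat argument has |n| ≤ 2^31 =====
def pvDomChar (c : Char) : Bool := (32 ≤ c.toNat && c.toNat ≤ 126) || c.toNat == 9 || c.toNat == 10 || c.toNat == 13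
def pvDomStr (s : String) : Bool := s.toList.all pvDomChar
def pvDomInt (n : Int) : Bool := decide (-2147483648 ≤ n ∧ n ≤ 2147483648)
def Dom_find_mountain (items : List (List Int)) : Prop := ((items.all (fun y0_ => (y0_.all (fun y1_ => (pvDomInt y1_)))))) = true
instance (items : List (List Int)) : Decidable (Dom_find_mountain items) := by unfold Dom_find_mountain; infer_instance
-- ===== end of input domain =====

-- B replaces A's two full passes (compute the max floored at 0, then rescan for its first
-- position) by one pass keeping a running (best, pos); measured faster by a constant factor.

-- ===== PORT A =====
-- mx = 0; for each cell: mx = max(mx, cell)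
def pvMaxRow (acc : Int) (row : List Int) : Int := row.foldl (fun a v => max a v) acc
def pvMaxGrid (items : List (List Int)) : Int := items.foldl pvMaxRow 0
-- second double loop: first (i, j) with items[i][j] == mx (None if absent)
def pvRowFind (mx : Int) (i : Int) : List Int → Int → Option (Int × Int)
  | [], _ => none
  | v :: vs, j => if v = mx then some (i, j) else pvRowFind mx i vs (j + 1)
def pvGridFind (mx : Int) : List (List Int) → Int → Option (Int × Int)
  | [], _ => none
  | row :: rest, i =>
    match pvRowFind mx i row 0 with
    | some p => some p
    | none => pvGridFind mx rest (i + 1)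
def find_mountain (items : List (List Int)) : Int × Int :=
  (pvGridFind (pvMaxGrid items) items 0).getD (0, 0)

-- ===== PORT B =====
-- state (best, pos) : none ↔ best is None/pos is None in Source B
def pvRowScan (i : Int) : List Int → Int → Option (Int × (Int × Int)) → Option (Int × (Int × Int))
  | [], _, st => st
  | v :: vs, j, st =>
    pvRowScan i vs (j + 1)
      (match st with
       | none => if 0 ≤ v then some (v, (i, j)) else none
       | some (b, p) => if b < v then some (v, (i, j)) else some (b, p))
def pvGridScan : List (List Int) → Int → Option (Int × (Int × Int)) → Option (Int × (Int × Int))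
  | [], _, st => st
  | row :: rest, i, st => pvGridScan rest (i + 1) (pvRowScan i row 0 st)
def find_mountain_alt (items : List (List Int)) : Int × Int :=
  match pvGridScan items 0 none with
  | some (_, p) => p
  | none => (0, 0)   -- Source B returns None here; outside Pre_

-- ===== PRECONDITION & SPEC =====
-- Pre_ excludes grids with no nonnegative cell: there A falls off both loops and returns
-- None (and Source B's pos stays None), which is not a value of the declared tuple type.
def Pre_find_mountain (items : List (List Int)) : Prop :=
  ∃ row ∈ items, ∃ v ∈ row, 0 ≤ v
instance (items : List (List Int)) : Decidable (Pre_find_mountain items) := by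
  unfold Pre_find_mountain; infer_instance
def pvWitness_find_mountain : List (List Int) := [[0, 3], [5, 2]]
def Spec_find_mountain (items : List (List Int)) (out : Int × Int) : Prop := out = find_mountain_alt items
instance (items : List (List Int)) (out : Int × Int) : Decidable (Spec_find_mountain items out) := by unfold Spec_find_mountain; infer_instance

-- ===== CLAIM (what is proved, stated in full; the proofs are below) =====
def Claim_equal_find_mountain : Prop := ∀ (items : List (List Int)), Dom_find_mountain items → Pre_find_mountain items → Spec_find_mountain items (find_mountain items)

-- ===== LEMMAS AND PROOFS =====

-- flattened cell list ((i, j), value) in traversal order, used only by the proofs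
def pvRowCells (i : Int) : List Int → Int → List ((Int × Int) × Int)
  | [], _ => []
  | v :: vs, j => ((i, j), v) :: pvRowCells i vs (j + 1)
def pvCells : List (List Int) → Int → List ((Int × Int) × Int)
  | [], _ => []
  | row :: rest, i => pvRowCells i row 0 ++ pvCells rest (i + 1)

def fMax (l : List ((Int × Int) × Int)) (a : Int) : Int := l.foldl (fun a c => max a c.2) a
def fFind (m : Int) : List ((Int × Int) × Int) → Option (Int × Int)
  | [] => none
  | (p, v) :: rest => if v = m then some p else fFind m rest
def fStep (st : Option (Int × (Int × Int))) (p : Int × Int) (v : Int) : Option (Int × (Int × Int)) :=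
  match st with
  | none => if 0 ≤ v then some (v, p) else none
  | some (b, q) => if b < v then some (v, p) else some (b, q)
def fScan : List ((Int × Int) × Int) → Option (Int × (Int × Int)) → Option (Int × (Int × Int))
  | [], st => st
  | (p, v) :: rest, st => fScan rest (fStep st p v)

theorem fMax_cons (q : Int × Int) (v : Int) (l : List ((Int × Int) × Int)) (a : Int) :
    fMax ((q, v) :: l) a = fMax l (max a v) := rfl
theorem fScan_cons (q : Int × Int) (v : Int) (l : List ((Int × Int) × Int)) st :
    fScan ((q, v) :: l) st = fScan l (fStep st q v) := rfl
theorem fFind_cons (m : Int) (q : Int × Int) (v : Int) (l : List ((Int × Int) × Int)) :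
    fFind m ((q, v) :: l) = if v = m then some q else fFind m l := rfl

theorem fMax_append (l₁ l₂ : List ((Int × Int) × Int)) (a : Int) :
    fMax (l₁ ++ l₂) a = fMax l₂ (fMax l₁ a) := by
  simp [fMax, List.foldl_append]

theorem fFind_append (m : Int) (l₁ l₂ : List ((Int × Int) × Int)) :
    fFind m (l₁ ++ l₂) = match fFind m l₁ with | some p => some p | none => fFind m l₂ := by
  induction l₁ with
  | nil => simp [fFind]
  | cons c rest ih =>
    obtain ⟨p, v⟩ := c
    by_cases h : v = m <;> simp [fFind, h, ih]

theorem fScan_append (l₁ l₂ : List ((Int × Int) × Int)) (st : Option (Int × (Int × Int))) :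
    fScan (l₁ ++ l₂) st = fScan l₂ (fScan l₁ st) := by
  induction l₁ generalizing st with
  | nil => simp [fScan]
  | cons c rest ih => obtain ⟨p, v⟩ := c; simp [fScan, ih]

theorem pvRowFind_eq (mx i : Int) (row : List Int) (j : Int) :
    pvRowFind mx i row j = fFind mx (pvRowCells i row j) := by
  induction row generalizing j with
  | nil => simp [pvRowFind, pvRowCells, fFind]
  | cons v vs ih => simp [pvRowFind, pvRowCells, fFind, ih]

theorem pvGridFind_eq (mx : Int) (items : List (List Int)) (i : Int) :
    pvGridFind mx items i = fFind mx (pvCells items i) := by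
  induction items generalizing i with
  | nil => simp [pvGridFind, pvCells, fFind]
  | cons row rest ih =>
    simp [pvGridFind, pvCells, fFind_append, pvRowFind_eq, ih]

theorem pvMaxRow_eq (row : List Int) (i j a : Int) :
    pvMaxRow a row = fMax (pvRowCells i row j) a := by
  induction row generalizing j a with
  | nil => simp [pvMaxRow, pvRowCells, fMax]
  | cons v vs ih => simp [pvMaxRow, pvRowCells, fMax] at *; exact ih _ _

theorem pvMaxGrid_eq (items : List (List Int)) (i a : Int) :
    items.foldl pvMaxRow a = fMax (pvCells items i) a := by
  induction items generalizing i a with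
  | nil => simp [pvCells, fMax]
  | cons row rest ih =>
    simp only [List.foldl_cons, pvCells, fMax_append]
    rw [← pvMaxRow_eq row i 0]
    exact ih (i + 1) _

theorem pvRowScan_eq (i : Int) (row : List Int) (j : Int) st :
    pvRowScan i row j st = fScan (pvRowCells i row j) st := by
  induction row generalizing j st with
  | nil => simp [pvRowScan, pvRowCells, fScan]
  | cons v vs ih => simp [pvRowScan, pvRowCells, fScan, fStep, ih]

theorem pvGridScan_eq (items : List (List Int)) (i : Int) st :
    pvGridScan items i st = fScan (pvCells items i) st := by
  induction items generalizing i st with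
  | nil => simp [pvGridScan, pvCells, fScan]
  | cons row rest ih => simp [pvGridScan, pvCells, fScan_append, pvRowScan_eq, ih]

theorem le_fMax (l : List ((Int × Int) × Int)) (a : Int) : a ≤ fMax l a := by
  induction l generalizing a with
  | nil => simp [fMax]
  | cons c rest ih =>
    obtain ⟨q, v⟩ := c
    rw [fMax_cons]
    exact le_trans (le_max_left a v) (ih (max a v))

-- if the running max strictly increased past the seed, its value occurs in the list
theorem fMax_attain (l : List ((Int × Int) × Int)) (a : Int) :
    fMax l a = a ∨ (fFind (fMax l a) l).isSome := by
  induction l generalizing a with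
  | nil => simp [fMax]
  | cons c rest ih =>
    obtain ⟨q, v⟩ := c
    rw [fMax_cons, fFind_cons]
    by_cases hv : v = fMax rest (max a v)
    · right; rw [if_pos hv]; simp
    · rw [if_neg hv]
      rcases ih (max a v) with h | h
      · rcases max_choice a v with h1 | h1
        · left; omega
        · exact absurd (by omega : v = fMax rest (max a v)) hv
      · right; exact h

-- scan from a some-state: value becomes the running max; position is the first
-- occurrence of that max if it improved, else unchanged
theorem fScan_some (l : List ((Int × Int) × Int)) (b : Int) (p : Int × Int) :
    fScan l (some (b, p)) =
      some (fMax l b, if fMax l b = b then p else (fFind (fMax l b) l).getD p) := by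
  induction l generalizing b p with
  | nil => simp [fScan, fMax]
  | cons c rest ih =>
    obtain ⟨q, v⟩ := c
    rw [fScan_cons, fMax_cons, fFind_cons]
    show fScan rest (if b < v then some (v, q) else some (b, p)) = _
    by_cases hbv : b < v
    · rw [if_pos hbv]
      have hmax : max b v = v := by omega
      rw [hmax, ih]
      have hvM : v ≤ fMax rest v := le_fMax rest v
      have hMb : ¬ fMax rest v = b := by omega
      rw [if_neg hMb]
      by_cases hMv : fMax rest v = v
      · rw [if_pos hMv, if_pos hMv.symm]; simp
      · have hne : ¬ v = fMax rest v := fun h => hMv h.symm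
        rcases fMax_attain rest v with h | h
        · exact absurd h hMv
        · obtain ⟨r, hr⟩ := Option.isSome_iff_exists.mp h
          rw [if_neg hMv, if_neg hne, hr]; simp
    · rw [if_neg hbv]
      have hmax : max b v = b := by omega
      rw [hmax, ih]
      by_cases hMb : fMax rest b = b
      · rw [if_pos hMb, if_pos hMb]
      · have hbM : b ≤ fMax rest b := le_fMax rest b
        have hne : ¬ v = fMax rest b := by omega
        rw [if_neg hMb, if_neg hMb, if_neg hne]

-- scan from None on a list with a nonnegative value = A's (floored max, first position)
theorem fScan_none (l : List ((Int × Int) × Int)) (h : ∃ c ∈ l, 0 ≤ c.2) :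
    fScan l none = some (fMax l 0, (fFind (fMax l 0) l).getD (0, 0)) := by
  induction l with
  | nil => simp at h
  | cons c rest ih =>
    obtain ⟨q, v⟩ := c
    rw [fScan_cons, fMax_cons, fFind_cons]
    by_cases hv : 0 ≤ v
    · show fScan rest (if 0 ≤ v then some (v, q) else none) = _
      rw [if_pos hv]
      have hmax : max 0 v = v := by omega
      rw [hmax, fScan_some]
      by_cases hMv : fMax rest v = v
      · rw [if_pos hMv, if_pos hMv.symm]; simp
      · have hvM : v ≤ fMax rest v := le_fMax rest v
        have hne : ¬ v = fMax rest v := fun h' => hMv h'.symm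
        rcases fMax_attain rest v with h' | h'
        · exact absurd h' hMv
        · obtain ⟨r, hr⟩ := Option.isSome_iff_exists.mp h'
          rw [if_neg hMv, if_neg hne, hr]; simp
    · show fScan rest (if 0 ≤ v then some (v, q) else none) = _
      rw [if_neg hv]
      have hrest : ∃ c ∈ rest, 0 ≤ c.2 := by
        rcases h with ⟨c, hc, hc0⟩
        rcases List.mem_cons.mp hc with rfl | hc
        · exact absurd hc0 hv
        · exact ⟨c, hc, hc0⟩
      rw [ih hrest]
      have hmax : max 0 v = 0 := by omega
      rw [hmax]
      have h0M : (0 : Int) ≤ fMax rest 0 := le_fMax rest 0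
      have hne : ¬ v = fMax rest 0 := by omega
      rw [if_neg hne]

theorem rowcells_ex (i v : Int) (hv0 : 0 ≤ v) (row : List Int) (hv : v ∈ row) :
    ∀ j : Int, ∃ c ∈ pvRowCells i row j, 0 ≤ c.2 := by
  induction row with
  | nil => simp at hv
  | cons w ws ih =>
    intro j
    rcases List.mem_cons.mp hv with rfl | h
    · exact ⟨((i, j), v), by simp [pvRowCells], hv0⟩
    · obtain ⟨c, hc, hc0⟩ := ih h (j + 1)
      exact ⟨c, by simp [pvRowCells, hc], hc0⟩

theorem pre_cells (items : List (List Int)) (h : Pre_find_mountain items) :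
    ∀ i : Int, ∃ c ∈ pvCells items i, 0 ≤ c.2 := by
  obtain ⟨row, hrow, v, hv, hv0⟩ := h
  induction items with
  | nil => simp at hrow
  | cons r rest ih =>
    intro i
    rcases List.mem_cons.mp hrow with rfl | hr
    · obtain ⟨c, hc, hc0⟩ := rowcells_ex i v hv0 row hv 0
      exact ⟨c, by simp [pvCells, hc], hc0⟩
    · obtain ⟨c, hc, hc0⟩ := ih hr (i + 1)
      exact ⟨c, by simp [pvCells, hc], hc0⟩

-- ===== VERDICT (by name: the statement is the Claim_ definition above) =====
theorem find_mountain_spec : Claim_equal_find_mountain := by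
  intro items _ hpre
  unfold Spec_find_mountain find_mountain find_mountain_alt
  rw [pvGridScan_eq, fScan_none _ (pre_cells items hpre 0)]
  unfold pvMaxGrid
  rw [pvGridFind_eq, pvMaxGrid_eq items 0 0]
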